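-- pv_equiv track=rewrite | github.com/NayeemHasan9964/Python | pythonQuestions2.py | largest_swap
-- ===== SOURCE A (Python) =====
-- def largest_swap(num):
--         R_num = 0
--         while num > 0:
--                 num1 = num % 10
--                 R_num = R_num*10 +  num1
--                 num = num // 10
--         if (R_num > num):
--                 return R_num
--         else:
--                 return num
-- ===== SOURCE B (Python) =====
-- def largest_swap(num):
--     if num <= 0:
--         return 0
--     return sum((ord(c) - 48) * 10 ** i for i, c in enumerate(str(num)))
-- ===== Notes on version B (the rewrite author's own statement) =====
-- stated objective: alternative
-- what changed: Replaces the destructive divmod while-loop (and its leftover comparison of the accumulator against the destroyed loop variable) with a closed-form sum over the decimal string: each digit is weighted by ten raised to its big-endian index, which yields exactly the reversed number; non-positive inputs take the direct zero branch, as A's skipped loop does.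
import Mathlib
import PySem

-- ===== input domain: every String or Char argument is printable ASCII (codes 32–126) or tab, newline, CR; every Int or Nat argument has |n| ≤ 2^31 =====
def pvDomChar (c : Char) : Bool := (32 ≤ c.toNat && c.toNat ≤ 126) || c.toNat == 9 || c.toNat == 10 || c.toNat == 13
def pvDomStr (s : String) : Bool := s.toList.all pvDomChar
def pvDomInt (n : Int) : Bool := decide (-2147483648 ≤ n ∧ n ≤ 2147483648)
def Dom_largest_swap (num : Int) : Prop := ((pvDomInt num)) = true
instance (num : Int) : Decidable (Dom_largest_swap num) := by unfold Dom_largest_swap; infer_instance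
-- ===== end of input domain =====

-- B replaces A's destructive divmod while-loop (and its leftover R_num > num comparison) by a
-- closed-form sum over the decimal string, each digit weighted by ten raised to its big-endian
-- index (objective: alternative, same cost in the number of digits).

-- ===== PORT A =====
-- the while loop: state (num, R_num); returns the state when the guard fails
def lsLoop (num R_num : Int) : Int × Int :=
  if num > 0 then
    -- num1 = num % 10; R_num = R_num*10 + num1; num = num // 10
    lsLoop (PySem.Int.floordiv num 10) (R_num * 10 + PySem.Int.mod num 10)
  else (num, R_num)
termination_by num.toNat
decreasing_by
  rw [PySem.Int.floordiv_eq_ediv_of_pos (by norm_num)]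
  omega

def largest_swap (num : Int) : Int :=
  let p := lsLoop num 0
  if p.2 > p.1 then p.2 else p.1

-- ===== PORT B =====
-- sum((ord(c) - 48) * 10 ** i for i, c in enumerate(str(num))); the exponent i is an
-- enumerate index, always ≥ 0, so taking it as ic.1.toNat is exact
def largest_swap_alt (num : Int) : Int :=
  if num ≤ 0 then 0
  else
    ((PySem.List.enumerate (PySem.Int.toStr num).toList 0).map
      (fun ic => ((ic.2.toNat : Int) - 48) * 10 ^ ic.1.toNat)).sum

-- ===== PRECONDITION & SPEC =====
def Spec_largest_swap (num : Int) (out : Int) : Prop := out = largest_swap_alt num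
instance (num : Int) (out : Int) : Decidable (Spec_largest_swap num out) := by unfold Spec_largest_swap; infer_instance

-- ===== CLAIM (what is proved, stated in full; the proofs are below) =====
def Claim_equal_largest_swap : Prop := ∀ (num : Int), Dom_largest_swap num → Spec_largest_swap num (largest_swap num)

-- ===== LEMMAS AND PROOFS =====

-- the value both programs compute on a positive input: the decimal-digit reversal
def revVal (m : Nat) : Nat := Nat.ofDigits 10 (Nat.digits 10 m).reverse

-- A's loop, characterised: it drives num to 0 and accumulates the digit reversal
theorem lsLoop_eq (m : Nat) :
    ∀ acc : Int, lsLoop (m : Int) acc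
      = (0, acc * 10 ^ (Nat.digits 10 m).length + (revVal m : Int)) := by
  induction m using Nat.strong_induction_on with
  | _ m ih =>
    intro acc
    rcases Nat.eq_zero_or_pos m with hm | hm
    · subst hm
      rw [lsLoop]
      simp [revVal]
    · rw [lsLoop]
      have hpos : ((m : Int) > 0) := by exact_mod_cast hm
      rw [if_pos hpos]
      have h1 : PySem.Int.floordiv (m : Int) 10 = ((m / 10 : Nat) : Int) :=
        PySem.Int.floordiv_natCast m 10
      have h2 : PySem.Int.mod (m : Int) 10 = ((m % 10 : Nat) : Int) :=
        PySem.Int.mod_natCast m 10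
      rw [h1, h2, ih (m / 10) (Nat.div_lt_self hm (by norm_num))]
      have hd : Nat.digits 10 m = m % 10 :: Nat.digits 10 (m / 10) :=
        Nat.digits_def' (by norm_num) hm
      have hrev : (revVal m : Int)
          = (revVal (m / 10) : Int) + 10 ^ (Nat.digits 10 (m / 10)).length * ((m % 10 : Nat) : Int) := by
        unfold revVal
        rw [hd]
        simp only [List.reverse_cons, Nat.ofDigits_append, Nat.ofDigits_cons, Nat.ofDigits_nil,
          List.length_reverse]
        push_cast
        ring_nf
      rw [hd, hrev]
      simp only [List.length_cons]
      push_cast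
      ring_nf

-- the decimal character list of a positive integer, little-endian digits reversed
theorem toDigitsCore_eq (fuel : Nat) :
    ∀ m : Nat, 0 < m → m < fuel → ∀ ds : List Char,
      Nat.toDigitsCore 10 fuel m ds = ((Nat.digits 10 m).map Nat.digitChar).reverse ++ ds := by
  induction fuel with
  | zero => intro m _ hlt; omega
  | succ f ih =>
    intro m hm _ ds
    rw [Nat.toDigitsCore]
    by_cases h0 : m / 10 = 0
    · rw [if_pos h0]
      have : Nat.digits 10 m = [m % 10] := by
        rw [Nat.digits_def' (by norm_num) hm, h0]
        simp
      rw [this]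
      simp
    · rw [if_neg h0]
      have hpos : 0 < m / 10 := Nat.pos_of_ne_zero h0
      have hlt : m / 10 < f := by
        have := Nat.div_lt_self hm (show 1 < 10 by norm_num)
        omega
      rw [ih (m / 10) hpos hlt]
      rw [Nat.digits_def' (by norm_num) hm]
      simp

theorem toChars_pos (m : Nat) (hm : 0 < m) :
    PySem.Int.toChars (m : Int) = ((Nat.digits 10 m).reverse.map Nat.digitChar) := by
  unfold PySem.Int.toChars
  rw [if_neg (by omega)]
  have : ((m : Int)).toNat = m := Int.toNat_natCast m
  rw [this]
  unfold Nat.toDigits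
  rw [toDigitsCore_eq (m + 1) m hm (by omega) []]
  simp [List.map_reverse]

-- digitChar is ASCII digit + 48 below base 10
theorem digitChar_toNat (d : Nat) (hd : d < 10) : (Nat.digitChar d).toNat = d + 48 := by
  interval_cases d <;> decide

-- B's enumerated sum over a digit-character list, with a generalised start index
theorem sum_enumerate_digits (ds : List Nat) :
    ∀ n : Nat, (∀ d ∈ ds, d < 10) →
      ((PySem.List.enumerate (ds.map Nat.digitChar) (n : Int)).map
        (fun ic => ((ic.2.toNat : Int) - 48) * 10 ^ ic.1.toNat)).sum
      = 10 ^ n * ((Nat.ofDigits 10 ds : Nat) : Int) := by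
  induction ds with
  | nil => intro n _; simp [PySem.List.enumerate_nil]
  | cons d ds ih =>
    intro n hds
    have hd : d < 10 := hds d (List.mem_cons_self ..)
    rw [List.map_cons, PySem.List.enumerate_cons, List.map_cons, List.sum_cons]
    have : ((n : Int) + 1) = ((n + 1 : Nat) : Int) := by push_cast; ring
    rw [this, ih (n + 1) (fun x hx => hds x (List.mem_cons_of_mem _ hx))]
    simp only [Int.toNat_natCast, digitChar_toNat d hd]
    push_cast [Nat.ofDigits_cons]
    ring

-- ===== VERDICT (by name: the statement is the Claim_ definition above) =====
theorem largest_swap_spec : Claim_equal_largest_swap := by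
  intro num _
  unfold Spec_largest_swap largest_swap largest_swap_alt
  by_cases hn : num ≤ 0
  · rw [if_pos hn]
    have h0 : ¬ num > 0 := by omega
    rw [lsLoop, if_neg h0]
    show (if (num, (0:Int)).2 > (num, (0:Int)).1 then (num, (0:Int)).2 else (num, (0:Int)).1) = 0
    split_ifs with h
    · rfl
    · simp only at h ⊢
      omega
  · rw [if_neg hn]
    have hn' : 0 < num := not_le.mp hn
    obtain ⟨m, rfl⟩ : ∃ m : Nat, num = (m : Int) := ⟨num.toNat, (Int.toNat_of_nonneg (by omega)).symm⟩
    have hm : 0 < m := by exact_mod_cast hn'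
    rw [lsLoop_eq m 0]
    have hsum := sum_enumerate_digits (Nat.digits 10 m).reverse 0
      (fun d hd => Nat.digits_lt_base (by norm_num) (List.mem_reverse.mp hd))
    simp only [Nat.cast_zero, pow_zero, one_mul] at hsum
    rw [PySem.Int.toList_toStr, toChars_pos m hm, hsum]
    show (if (0:Int) * 10 ^ (Nat.digits 10 m).length + (revVal m : Int) > (0:Int)
            then (0:Int) * 10 ^ (Nat.digits 10 m).length + (revVal m : Int) else (0:Int)) = _
    simp only [zero_mul, zero_add]
    unfold revVal
    split_ifs with h <;> omega
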